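-- pv_equiv track=rewrite | github.com/MinorGlitch/ethernity | src/ethernity/config/installer.py | _find_unquoted_hash
-- ===== SOURCE A (Python) =====
-- def _find_unquoted_hash(line: str) -> int:
--     """Return index of first # outside quoted strings, or -1 when absent."""
--
--     in_double = False
--     in_single = False
--     escaped = False
--
--     for index, ch in enumerate(line):
--         if in_double:
--             if escaped:
--                 escaped = False
--                 continue
--             if ch == "\\":
--                 escaped = True
--                 continue
--             if ch == '"':
--                 in_double = False
--             continue
--         if in_single:
--             if ch == "'":
--                 in_single = False
--             continue
--
--         if ch == '"':
--             in_double = True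
--             continue
--         if ch == "'":
--             in_single = True
--             continue
--         if ch == "#":
--             return index
--
--     return -1
-- ===== SOURCE B (Python) =====
-- def _skip_double(line, i):
--     # consume a double-quoted string body starting after the opening quote;
--     # backslash escapes the next character; unterminated -> end of line
--     n = len(line)
--     while i < n:
--         if line[i] == "\\":
--             i += 2
--         elif line[i] == '"':
--             return i + 1
--         else:
--             i += 1
--     return i
--
--
-- def _skip_single(line, i):
--     # consume a single-quoted string body (no escapes); unterminated -> end of line
--     n = len(line)
--     while i < n:
--         if line[i] == "'":
--             return i + 1
--         i += 1
--     return i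
--
--
-- def _find_unquoted_hash(line: str) -> int:
--     """Return index of first # outside quoted strings, or -1 when absent."""
--     n = len(line)
--     i = 0
--     while i < n:
--         ch = line[i]
--         if ch == '"':
--             i = _skip_double(line, i + 1)
--         elif ch == "'":
--             i = _skip_single(line, i + 1)
--         elif ch == "#":
--             return i
--         else:
--             i += 1
--     return -1
-- ===== Notes on version B (the rewrite author's own statement) =====
-- stated objective: simpler
-- what changed: Replaced the per-character flag state machine (in_double/in_single/escaped booleans reset each iteration) with a tokenizer: the main loop jumps over whole quoted strings via two skip helpers and only inspects characters at top level.
import Mathlib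
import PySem

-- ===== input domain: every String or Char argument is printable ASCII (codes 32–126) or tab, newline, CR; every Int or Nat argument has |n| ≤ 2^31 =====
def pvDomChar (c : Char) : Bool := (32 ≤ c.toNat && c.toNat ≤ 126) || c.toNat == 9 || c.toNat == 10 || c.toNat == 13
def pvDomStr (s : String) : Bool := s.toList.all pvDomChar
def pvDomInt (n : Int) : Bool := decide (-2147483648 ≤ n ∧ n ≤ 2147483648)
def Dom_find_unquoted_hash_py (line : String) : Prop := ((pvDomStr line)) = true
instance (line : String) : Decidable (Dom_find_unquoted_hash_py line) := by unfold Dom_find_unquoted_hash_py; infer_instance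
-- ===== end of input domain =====

-- B replaces A's per-character flag state machine by a tokenizer that skips whole
-- quoted strings with helper functions (objective: simpler).

-- ===== PORT A =====
-- A's for-loop over enumerate(line) with the three flags, branches in source order.
def pvAGo : List Char → Int → Bool → Bool → Bool → Int
  | [], _, _, _, _ => -1
  | c :: rest, i, inD, inS, esc =>
    if inD then
      if esc then pvAGo rest (i + 1) inD inS false
      else if c = '\\' then pvAGo rest (i + 1) inD inS true
      else if c = '"' then pvAGo rest (i + 1) false inS esc
      else pvAGo rest (i + 1) inD inS esc
    else if inS then
      if c = '\'' then pvAGo rest (i + 1) inD false esc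
      else pvAGo rest (i + 1) inD inS esc
    else if c = '"' then pvAGo rest (i + 1) true inS esc
    else if c = '\'' then pvAGo rest (i + 1) inD true esc
    else if c = '#' then i
    else pvAGo rest (i + 1) inD inS esc

def find_unquoted_hash_py (line : String) : Int :=
  pvAGo line.toList 0 false false false

-- ===== PORT B =====
-- number of characters _skip_double consumes from the rest of the line
def pvSkipD : List Char → Nat
  | [] => 0
  | c :: rest =>
    if c = '\\' then 2 + pvSkipD rest.tail
    else if c = '"' then 1
    else 1 + pvSkipD rest
termination_by cs => cs.length
decreasing_by
  · simp only [List.length_cons]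
    cases rest <;> simp
  · simp

-- number of characters _skip_single consumes from the rest of the line
def pvSkipS : List Char → Nat
  | [] => 0
  | c :: rest => if c = '\'' then 1 else 1 + pvSkipS rest

-- the main while-loop: jump over quoted tokens, look only at top-level characters
def pvBGo : List Char → Int → Int
  | [], _ => -1
  | c :: rest, i =>
    if c = '"' then
      let k := pvSkipD rest
      pvBGo (rest.drop k) (i + 1 + (k : Int))
    else if c = '\'' then
      let k := pvSkipS rest
      pvBGo (rest.drop k) (i + 1 + (k : Int))
    else if c = '#' then i
    else pvBGo rest (i + 1)
termination_by cs => cs.length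
decreasing_by
  · simp only [List.length_cons]
    have : (rest.drop (pvSkipD rest)).length ≤ rest.length := by simp
    omega
  · simp only [List.length_cons]
    have : (rest.drop (pvSkipS rest)).length ≤ rest.length := by simp
    omega
  · simp

def find_unquoted_hash_py_alt (line : String) : Int :=
  pvBGo line.toList 0

-- ===== PRECONDITION & SPEC =====
def Spec_find_unquoted_hash_py (line : String) (out : Int) : Prop := out = find_unquoted_hash_py_alt line
instance (line : String) (out : Int) : Decidable (Spec_find_unquoted_hash_py line out) := by unfold Spec_find_unquoted_hash_py; infer_instance

-- ===== CLAIM (what is proved, stated in full; the proofs are below) =====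
def Claim_equal_find_unquoted_hash_py : Prop := ∀ (line : String), Dom_find_unquoted_hash_py line → Spec_find_unquoted_hash_py line (find_unquoted_hash_py line)

-- ===== LEMMAS AND PROOFS =====

-- A in the in_double state behaves like skipping pvSkipD characters and returning neutral
theorem pvLemD (cs : List Char) (i : Int) :
    pvAGo cs i true false false =
      pvAGo (cs.drop (pvSkipD cs)) (i + (pvSkipD cs : Int)) false false false := by
  match cs with
  | [] => simp [pvAGo, pvSkipD]
  | c :: rest =>
    by_cases hb : c = '\\'
    · match rest with
      | [] => simp [pvAGo, pvSkipD, hb]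
      | d :: rest' =>
        have ih := pvLemD rest' (i + 2)
        simp only [pvAGo, pvSkipD, hb, if_true, List.tail_cons] at ih ⊢
        norm_num
        have e : i + 1 + 1 = i + 2 := by ring
        rw [e, ih]
        have h2 : List.drop (2 + pvSkipD rest') ('\\' :: d :: rest') = List.drop (pvSkipD rest') rest' := by
          rw [Nat.add_comm]; simp [List.drop_succ_cons]
        rw [h2]
        congr 1
        ring
    · by_cases hq : c = '"'
      · simp [pvAGo, pvSkipD, hq]
      · have ih := pvLemD rest (i + 1)
        simp only [pvAGo, pvSkipD, hb, hq, if_false, Bool.false_eq_true, if_true] at ih ⊢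
        norm_num
        rw [ih]
        have h2 : List.drop (1 + pvSkipD rest) (c :: rest) = List.drop (pvSkipD rest) rest := by
          rw [Nat.add_comm]; simp
        rw [h2]
        congr 1
        ring
termination_by cs.length

-- A in the in_single state behaves like skipping pvSkipS characters and returning neutral
theorem pvLemS (cs : List Char) (i : Int) :
    pvAGo cs i false true false =
      pvAGo (cs.drop (pvSkipS cs)) (i + (pvSkipS cs : Int)) false false false := by
  induction cs generalizing i with
  | nil => simp [pvAGo, pvSkipS]
  | cons c rest ih =>
    by_cases hc : c = '\''
    · simp [pvAGo, pvSkipS, hc]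
    · simp only [pvAGo, pvSkipS, hc, if_false, Bool.false_eq_true, if_true]
      rw [ih]
      have h2 : List.drop (1 + pvSkipS rest) (c :: rest) = List.drop (pvSkipS rest) rest := by
        rw [Nat.add_comm]; simp
      rw [h2]
      congr 1
      push_cast
      ring

theorem pvMain (cs : List Char) (i : Int) :
    pvAGo cs i false false false = pvBGo cs i := by
  match cs with
  | [] => simp [pvAGo, pvBGo]
  | c :: rest =>
    by_cases hq : c = '"'
    · have hlen : (rest.drop (pvSkipD rest)).length < (c :: rest).length := by
        have : (rest.drop (pvSkipD rest)).length ≤ rest.length := by simp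
        simp only [List.length_cons]; omega
      have ih := pvMain (rest.drop (pvSkipD rest)) (i + 1 + (pvSkipD rest : Int))
      simp only [pvAGo, pvBGo, hq, if_true, Bool.false_eq_true, if_false]
      rw [pvLemD, ih]
    · by_cases hs : c = '\''
      · have hlen : (rest.drop (pvSkipS rest)).length < (c :: rest).length := by
          have : (rest.drop (pvSkipS rest)).length ≤ rest.length := by simp
          simp only [List.length_cons]; omega
        have ih := pvMain (rest.drop (pvSkipS rest)) (i + 1 + (pvSkipS rest : Int))
        simp only [pvAGo, pvBGo, hs, if_true, if_false, Bool.false_eq_true]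
        rw [pvLemS, ih]
        simp
      · by_cases hh : c = '#'
        · simp [pvAGo, pvBGo, hh]
        · have ih := pvMain rest (i + 1)
          simp [pvAGo, pvBGo, hq, hs, hh, ih]
termination_by cs.length

-- ===== VERDICT (by name: the statement is the Claim_ definition above) =====
theorem find_unquoted_hash_py_spec : Claim_equal_find_unquoted_hash_py := by
  intro line _
  unfold Spec_find_unquoted_hash_py find_unquoted_hash_py find_unquoted_hash_py_alt
  exact pvMain line.toList 0
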